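-- pv_equiv track=rewrite | github.com/pypi-data/pypi-mirror-267 | packages/deropy/deropy-0.0.1.tar.gz/deropy-0.0.1/deropy/test.py | base64_vocabulary
-- ===== SOURCE A (Python) =====
-- def base64_vocabulary(s: str):
--     keys = 'ABCDEFGHIJKLMNOPQRSTUVWXYZabcdefghijklmnopqrstuvwxyz0123456789'
--     next_key = 0
--     second_key = 0
--     d = dict()
--
--     # loop through all the word of the string s
--     for word in s.split():
--         # if the word is not in the dictionary, add it
--         if word not in d:
--             d[word] = keys[next_key]
--             next_key += 1
--
--             if next_key == len(keys):
--                 next_key = 0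
--                 second_key += 1
--
--                 if second_key == len(keys):
--                     raise ValueError('The vocabulary is too small')
--
--     # Create a new string with the encoded words
--     encoded = ''
--     for word in s.split():
--         encoded += d[word]
--
--     return d, encoded
-- ===== SOURCE B (Python) =====
-- def base64_vocabulary(s: str):
--     keys = 'ABCDEFGHIJKLMNOPQRSTUVWXYZabcdefghijklmnopqrstuvwxyz0123456789'
--     words = s.split()
--     first = {}
--     for i, w in reversed(list(enumerate(words))):
--         first[w] = i
--     order = sorted(first, key=first.get)
--     if len(order) >= len(keys) ** 2:
--         raise ValueError('The vocabulary is too small')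
--     d = {w: keys[r % len(keys)] for r, w in enumerate(order)}
--     return d, ''.join(d[w] for w in words)
-- ===== Notes on version B (the rewrite author's own statement) =====
-- stated objective: alternative
-- what changed: Instead of A's forward scan with a membership test and a next_key/second_key wrap-counter state machine, B sweeps the words once in reverse to record each word's first-occurrence index in a dict, sorts the unique words by that index, and derives each key character in closed form as keys[rank % 62].
import Mathlib
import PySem

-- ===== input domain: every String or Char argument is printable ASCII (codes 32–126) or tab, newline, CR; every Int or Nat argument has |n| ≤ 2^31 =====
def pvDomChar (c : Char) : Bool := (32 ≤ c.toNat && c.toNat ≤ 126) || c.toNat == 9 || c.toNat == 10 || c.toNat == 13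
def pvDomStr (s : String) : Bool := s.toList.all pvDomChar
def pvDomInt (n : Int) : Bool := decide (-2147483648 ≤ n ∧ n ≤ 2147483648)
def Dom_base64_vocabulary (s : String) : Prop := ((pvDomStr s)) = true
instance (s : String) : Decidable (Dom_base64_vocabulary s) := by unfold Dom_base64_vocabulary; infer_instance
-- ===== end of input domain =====

-- B replaces A's forward incremental membership-test/wrap-counter state machine by a reverse
-- sweep recording each word's first-occurrence index and a sort by that index (alternative
-- decomposition, same return value on Pre_).

-- ===== PORT A =====
def pvKeys : String := "ABCDEFGHIJKLMNOPQRSTUVWXYZabcdefghijklmnopqrstuvwxyz0123456789"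

-- Python keys[i] is a one-character str: index the Char, wrap it as a String
def pvChar1 (o : Option Char) : String := (o.map (fun c => String.ofList [c])).getD ""

-- one iteration of A's first loop; state (d, next_key, second_key).  The ValueError A raises
-- when second_key reaches 62 (the 3844th distinct word) is excluded by Pre_; there the port
-- simply continues the loop.
def pvAStep (st : PySem.Dict String String × Int × Int) (w : String) :
    PySem.Dict String String × Int × Int :=
  if st.1.contains w then st
  else
    let d' := st.1.insert w (pvChar1 (PySem.Str.pyGet? pvKeys st.2.1))
    if st.2.1 + 1 = 62 then (d', 0, st.2.2 + 1) else (d', st.2.1 + 1, st.2.2)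

def base64_vocabulary (s : String) : (List (String × String)) × String :=
  let words := PySem.Str.split₀ s
  let st := words.foldl pvAStep (PySem.Dict.empty, 0, 0)
  -- d[word] never raises here: every word of s was inserted by the first loop
  (st.1.items, words.foldl (fun acc w => acc ++ st.1.getD w "") "")

-- ===== PORT B =====
-- the dict comprehension {w: keys[r % 62] for r, w in enumerate(order)}: its keys `order` are
-- distinct, so the dict IS this association list
def pvPairs (u : List String) : List (String × String) :=
  (PySem.List.enumerate u).map (fun p => (p.2, pvChar1 (PySem.Str.pyGet? pvKeys (PySem.Int.mod p.1 62))))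

def base64_vocabulary_alt (s : String) : (List (String × String)) × String :=
  let words := PySem.Str.split₀ s
  -- for i, w in reversed(list(enumerate(words))): first[w] = i
  let first : PySem.Dict String Int :=
    ((PySem.List.enumerate words).reverse).foldl (fun d p => d.insert p.2 p.1) PySem.Dict.empty
  -- sorted(first, key=first.get); every w iterated is a key of `first`, so first.get(w) is
  -- exactly first.getD w 0.  The `raise` when len(order) >= 3844 is excluded by Pre_.
  let order := PySem.List.sorted first.keys (fun w => first.getD w 0)
  let d : PySem.Dict String String := PySem.Dict.mk (pvPairs order)
  (d.items, PySem.Str.join "" (words.map (fun w => d.getD w "")))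

-- ===== PRECONDITION & SPEC =====
-- Pre_ excludes exactly the inputs (3844 or more distinct whitespace-separated words) on which
-- the Python A raises ValueError; B raises there too.
def Pre_base64_vocabulary (s : String) : Prop :=
  (PySem.List.dedup (PySem.Str.split₀ s)).length < 3844
instance (s : String) : Decidable (Pre_base64_vocabulary s) := by
  unfold Pre_base64_vocabulary; infer_instance
def pvWitness_base64_vocabulary : String := "the cat saw the dog"

def Spec_base64_vocabulary (s : String) (out : (List (String × String)) × String) : Prop := out = base64_vocabulary_alt s
instance (s : String) (out : (List (String × String)) × String) : Decidable (Spec_base64_vocabulary s out) := by unfold Spec_base64_vocabulary; infer_instance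

-- ===== CLAIM (what is proved, stated in full; the proofs are below) =====
def Claim_equal_base64_vocabulary : Prop := ∀ (s : String), Dom_base64_vocabulary s → Pre_base64_vocabulary s → Spec_base64_vocabulary s (base64_vocabulary s)

-- ===== LEMMAS AND PROOFS =====

-- the first-occurrence index of w in ws (0 when w ∉ ws)
def pvFidx (ws : List String) (w : String) : Int :=
  (((PySem.List.enumerate ws).find? (fun p => p.2 == w)).map (·.1)).getD 0

lemma pv_contains_mk_pairs (u : List String) (w : String) :
    (PySem.Dict.mk (pvPairs u)).contains w = u.contains w := by
  rw [PySem.Dict.contains_mk, pvPairs, List.any_map]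
  conv_rhs => rw [← PySem.List.map_snd_enumerate u 0]
  rw [List.contains_eq_any_beq, List.any_map]
  simp [Function.comp_def, BEq.comm]

lemma pv_pairs_append (u : List String) (w : String) :
    pvPairs (u ++ [w]) =
      pvPairs u ++ [(w, pvChar1 (PySem.Str.pyGet? pvKeys ((u.length % 62 : Nat) : Int)))] := by
  simp [pvPairs, PySem.List.enumerate_append, PySem.List.enumerate_cons,
    PySem.List.enumerate_nil]

lemma pv_loopA (ws : List String) : ∀ (u : List String) (sk : Int),
    ∃ sk', ws.foldl pvAStep (PySem.Dict.mk (pvPairs u), ((u.length % 62 : Nat) : Int), sk)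
      = (PySem.Dict.mk (pvPairs (PySem.Set.update u ws)),
         (((PySem.Set.update u ws).length % 62 : Nat) : Int), sk') := by
  induction ws with
  | nil => intro u sk; exact ⟨sk, rfl⟩
  | cons w t ih =>
    intro u sk
    simp only [List.foldl_cons]
    by_cases hw : w ∈ u
    · have hcm : (PySem.Dict.mk (pvPairs u)).contains w = true := by
        rw [pv_contains_mk_pairs]; simp [hw]
      have hstep : pvAStep (PySem.Dict.mk (pvPairs u), ((u.length % 62 : Nat) : Int), sk) w
          = (PySem.Dict.mk (pvPairs u), ((u.length % 62 : Nat) : Int), sk) := by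
        unfold pvAStep; rw [if_pos hcm]
      have hupd : PySem.Set.update u (w :: t) = PySem.Set.update u t := by
        simp [PySem.Set.update, PySem.Set.add, hw]
      rw [hstep, hupd]
      exact ih u sk
    · have hcm : (PySem.Dict.mk (pvPairs u)).contains w = false := by
        rw [pv_contains_mk_pairs]; simp [hw]
      have hins : (PySem.Dict.mk (pvPairs u)).insert w
            (pvChar1 (PySem.Str.pyGet? pvKeys ((u.length % 62 : Nat) : Int)))
          = PySem.Dict.mk (pvPairs (u ++ [w])) := by
        apply PySem.Dict.ext
        rw [PySem.Dict.items_insert_of_not_contains _ _ hcm, pv_pairs_append]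
      have hlen : (u ++ [w]).length = u.length + 1 := by simp
      have hstep : pvAStep (PySem.Dict.mk (pvPairs u), ((u.length % 62 : Nat) : Int), sk) w
          = (PySem.Dict.mk (pvPairs (u ++ [w])), (((u ++ [w]).length % 62 : Nat) : Int),
             if ((u.length % 62 : Nat) : Int) + 1 = 62 then sk + 1 else sk) := by
        unfold pvAStep
        rw [if_neg (by simp [hcm])]
        dsimp only
        rw [hins, hlen]
        split_ifs with h
        · rw [show (((u.length + 1) % 62 : Nat) : Int) = 0 by omega]
        · rw [show (((u.length + 1) % 62 : Nat) : Int)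
              = ((u.length % 62 : Nat) : Int) + 1 by omega]
      have hupd : PySem.Set.update u (w :: t) = PySem.Set.update (u ++ [w]) t := by
        simp [PySem.Set.update, PySem.Set.add, hw]
      rw [hstep, hupd]
      exact ih (u ++ [w]) _

lemma pv_rev_fold_get? (l : List (Int × String)) (d : PySem.Dict String Int) (w : String) :
    (l.reverse.foldl (fun d p => d.insert p.2 p.1) d).get? w
      = ((l.find? (fun p => p.2 == w)).map (·.1)).or (d.get? w) := by
  induction l generalizing d with
  | nil => simp
  | cons p t ih =>
    rw [List.reverse_cons, List.foldl_append]
    simp only [List.foldl_cons, List.foldl_nil]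
    by_cases h : p.2 = w
    · rw [PySem.Dict.get?_insert, if_pos h.symm,
        List.find?_cons_of_pos (by simp [h])]
      rfl
    · rw [PySem.Dict.get?_insert, if_neg (fun he => h he.symm),
        List.find?_cons_of_neg (by simp [h]), ih]

lemma pv_fidx_lt (ws : List String) (w : String) (h : w ∈ ws) :
    pvFidx ws w < (ws.length : Int) := by
  obtain ⟨k, hk, hkw⟩ := List.mem_iff_getElem.mp h
  have hsome : (((PySem.List.enumerate ws).find? (fun p => p.2 == w))).isSome := by
    rw [List.find?_isSome]
    refine ⟨((k : Int), w), ?_, by simp⟩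
    rw [PySem.List.mem_enumerate_iff]
    exact ⟨k, hk, by simp [hkw]⟩
  obtain ⟨p, hp⟩ := Option.isSome_iff_exists.mp hsome
  have hmem := List.mem_of_find?_eq_some hp
  rw [PySem.List.mem_enumerate_iff] at hmem
  obtain ⟨j, hj, hpj⟩ := hmem
  simp only [pvFidx, hp, Option.map_some, Option.getD_some, hpj]
  omega

lemma pv_fidx_append_mem (ws : List String) (v w : String) (h : v ∈ ws) :
    pvFidx (ws ++ [w]) v = pvFidx ws v := by
  obtain ⟨k, hk, hkw⟩ := List.mem_iff_getElem.mp h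
  have hsome : (((PySem.List.enumerate ws).find? (fun p => p.2 == v))).isSome := by
    rw [List.find?_isSome]
    refine ⟨((k : Int), v), ?_, by simp⟩
    rw [PySem.List.mem_enumerate_iff]
    exact ⟨k, hk, by simp [hkw]⟩
  obtain ⟨p, hp⟩ := Option.isSome_iff_exists.mp hsome
  simp [pvFidx, PySem.List.enumerate_append, List.find?_append, hp]

lemma pv_fidx_append_new (ws : List String) (w : String) (h : w ∉ ws) :
    pvFidx (ws ++ [w]) w = (ws.length : Int) := by
  have hnone : ((PySem.List.enumerate ws).find? (fun p => p.2 == w)) = none := by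
    rw [List.find?_eq_none]
    intro p hp
    rw [PySem.List.mem_enumerate_iff] at hp
    obtain ⟨k, hk, hpk⟩ := hp
    subst hpk
    intro hc
    simp only [beq_iff_eq] at hc
    exact h (hc ▸ List.getElem_mem hk)
  simp [pvFidx, PySem.List.enumerate_append, List.find?_append, hnone,
    PySem.List.enumerate_cons, PySem.List.enumerate_nil]

lemma pv_pairwise (ws : List String) :
    (PySem.List.dedup ws).Pairwise (fun a b => pvFidx ws a < pvFidx ws b) := by
  induction ws using List.reverseRecOn with
  | nil => simp [PySem.List.dedup]
  | append_singleton ws w ih =>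
    have hd : PySem.List.dedup (ws ++ [w]) = PySem.Set.add (PySem.List.dedup ws) w := by
      simp [PySem.List.dedup_eq_ofList, PySem.Set.ofList, List.foldl_append]
    rw [hd]
    by_cases hw : w ∈ ws
    · rw [show PySem.Set.add (PySem.List.dedup ws) w = PySem.List.dedup ws by
        simp [PySem.Set.add, hw]]
      refine ih.imp_of_mem ?_
      intro a b ha hb hlt
      rw [pv_fidx_append_mem ws a w ((PySem.List.mem_dedup ws a).mp ha),
        pv_fidx_append_mem ws b w ((PySem.List.mem_dedup ws b).mp hb)]
      exact hlt
    · rw [show PySem.Set.add (PySem.List.dedup ws) w = PySem.List.dedup ws ++ [w] by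
        simp [PySem.Set.add, hw]]
      rw [List.pairwise_append]
      refine ⟨?_, List.pairwise_singleton _ _, ?_⟩
      · refine ih.imp_of_mem ?_
        intro a b ha hb hlt
        rw [pv_fidx_append_mem ws a w ((PySem.List.mem_dedup ws a).mp ha),
          pv_fidx_append_mem ws b w ((PySem.List.mem_dedup ws b).mp hb)]
        exact hlt
      · intro a ha b hb
        rw [List.mem_singleton] at hb
        subst hb
        rw [pv_fidx_append_mem ws a b ((PySem.List.mem_dedup ws a).mp ha),
          pv_fidx_append_new ws b hw]
        exact pv_fidx_lt ws a ((PySem.List.mem_dedup ws a).mp ha)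

lemma pv_join_cons (x : String) (t : List String) :
    PySem.Str.join "" (x :: t) = x ++ PySem.Str.join "" t := by
  rw [← String.toList_inj]
  cases t with
  | nil =>
    simp [PySem.Str.join, PySem.Chars.join_singleton, PySem.Chars.join_nil]
  | cons y t' =>
    simp [PySem.Str.join, PySem.Chars.join_cons_cons]

lemma pv_foldl_str (f : String → String) (l : List String) (acc : String) :
    l.foldl (fun a x => a ++ f x) acc = acc ++ PySem.Str.join "" (l.map f) := by
  induction l generalizing acc with
  | nil =>
    have : PySem.Str.join "" ([] : List String) = "" := by
      rw [← String.toList_inj]; simp [PySem.Str.join, PySem.Chars.join_nil]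
    simp [this]
  | cons x t ih =>
    simp only [List.foldl_cons, List.map_cons]
    rw [ih, pv_join_cons, ← String.append_assoc]

lemma pv_order_eq (ws : List String) :
    PySem.List.sorted
      (((PySem.List.enumerate ws).reverse.foldl (fun d p => d.insert p.2 p.1)
          (PySem.Dict.empty : PySem.Dict String Int)).keys)
      (fun w => ((PySem.List.enumerate ws).reverse.foldl (fun d p => d.insert p.2 p.1)
          (PySem.Dict.empty : PySem.Dict String Int)).getD w 0)
      = PySem.List.dedup ws := by
  have hget : ∀ w, (((PySem.List.enumerate ws).reverse.foldl (fun d p => d.insert p.2 p.1)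
      (PySem.Dict.empty : PySem.Dict String Int))).get? w
      = ((PySem.List.enumerate ws).find? (fun p => p.2 == w)).map (·.1) := by
    intro w
    rw [pv_rev_fold_get?]
    simp [PySem.Dict.empty, PySem.Dict.get?]
  have hkeyF : (fun w => ((PySem.List.enumerate ws).reverse.foldl (fun d p => d.insert p.2 p.1)
      (PySem.Dict.empty : PySem.Dict String Int)).getD w 0) = pvFidx ws := by
    funext w
    rw [PySem.Dict.getD_eq_get?_getD, hget]
    rfl
  have hkeys : ((PySem.List.enumerate ws).reverse.foldl (fun d p => d.insert p.2 p.1)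
      (PySem.Dict.empty : PySem.Dict String Int)).keys = PySem.List.dedup ws.reverse := by
    have h := PySem.Dict.keys_foldl_insert_key (ν := Int)
      ((PySem.List.enumerate ws).reverse) (fun p => p.2) (fun _ p => p.1)
      (PySem.Dict.empty : PySem.Dict String Int)
    rw [List.map_reverse, PySem.List.map_snd_enumerate] at h
    rw [PySem.List.dedup_eq_ofList]
    exact h
  rw [hkeyF, hkeys]
  apply PySem.List.sorted_eq_of_perm_of_pairwise_lt
  · rw [List.perm_ext_iff_of_nodup (PySem.List.nodup_dedup _) (PySem.List.nodup_dedup _)]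
    intro a
    simp
  · exact pv_pairwise ws

-- ===== VERDICT (by name: the statement is the Claim_ definition above) =====
theorem base64_vocabulary_spec : Claim_equal_base64_vocabulary := by
  intro s _ _
  unfold Spec_base64_vocabulary base64_vocabulary base64_vocabulary_alt
  dsimp only
  rw [pv_order_eq (PySem.Str.split₀ s)]
  obtain ⟨sk', hA⟩ := pv_loopA (PySem.Str.split₀ s) [] 0
  have h0 : ((PySem.Dict.empty : PySem.Dict String String), (0 : Int), (0 : Int))
      = (PySem.Dict.mk (pvPairs []), ((([] : List String).length % 62 : Nat) : Int), (0 : Int)) := rfl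
  rw [h0, hA]
  have hupd : PySem.Set.update ([] : List String) (PySem.Str.split₀ s)
      = PySem.List.dedup (PySem.Str.split₀ s) := by
    rw [PySem.List.dedup_eq_ofList]; rfl
  rw [hupd]
  rw [pv_foldl_str (fun w => (PySem.Dict.mk (pvPairs (PySem.List.dedup (PySem.Str.split₀ s)))).getD w "")]
  simp
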